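-- pv_equiv track=rewrite | github.com/Rysin/HackerRankScripts | company/Practice.py | strip_white_space_and_group
-- ===== SOURCE A (Python) =====
-- def strip_white_space_and_group(string):
--     ls = []
--     s2 = ""
--     for s in string.replace(" ", ""):
--         s2 += s
--         if s2.count("(") == s2.count(")"):
--             ls.append(s2)
--             s2 = ""
--     return ls
-- ===== SOURCE B (Python) =====
-- def strip_white_space_and_group(string):
--     s = string.replace(" ", "")
--     # stage 1: length profile of the balanced chunks (integers only, no string building)
--     lengths = []
--     bal = 0
--     run = 0
--     for c in s:
--         run += 1
--         if c == '(':
--             bal += 1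
--         elif c == ')':
--             bal -= 1
--         if bal == 0:
--             lengths.append(run)
--             run = 0
--     # stage 2: cut the string along the length profile
--     out = []
--     pos = 0
--     for n in lengths:
--         out.append(s[pos:pos + n])
--         pos += n
--     return out
-- ===== Notes on version B (the rewrite author's own statement) =====
-- stated objective: alternative
-- what changed: B is a staged pipeline: one integer-only pass computes the length profile of the balanced chunks (no per-character string accumulation and no prefix recounting), then a second pass slices the de-spaced string along those lengths at a running position; A instead grows a chunk string character by character and recounts both parenthesis characters over the whole chunk after every character.
import Mathlib
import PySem

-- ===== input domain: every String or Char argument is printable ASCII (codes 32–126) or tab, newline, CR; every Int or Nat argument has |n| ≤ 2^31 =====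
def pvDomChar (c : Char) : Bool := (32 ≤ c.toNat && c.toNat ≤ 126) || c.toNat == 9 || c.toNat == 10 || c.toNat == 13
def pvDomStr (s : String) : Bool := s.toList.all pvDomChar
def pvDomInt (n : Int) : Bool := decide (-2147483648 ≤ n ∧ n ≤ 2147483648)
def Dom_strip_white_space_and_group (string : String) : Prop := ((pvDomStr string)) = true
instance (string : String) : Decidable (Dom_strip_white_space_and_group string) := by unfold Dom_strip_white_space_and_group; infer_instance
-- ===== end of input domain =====

-- B replaces A's per-character chunk growing with full-prefix recounting by a staged pipeline:
-- an integer-only pass computing the balanced-chunk length profile, then a pass slicing the string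
-- along that profile; objective: alternative decomposition.

-- ===== PORT A =====
-- loop body of A: s2 += s; if s2.count("(") == s2.count(")"): ls.append(s2); s2 = ""
def pvStepA (acc : List (List Char) × List Char) (s : Char) : List (List Char) × List Char :=
  let s2 := acc.2 ++ [s]
  if PySem.Chars.count s2 ['('] = PySem.Chars.count s2 [')'] then (acc.1 ++ [s2], [])
  else (acc.1, s2)

def strip_white_space_and_group (string : String) : List String :=
  (((PySem.Chars.replace string.toList [' '] []).foldl pvStepA ([], [])).1).map String.ofList

-- ===== PORT B =====
-- stage-1 loop body: run += 1; bal adjusted by c; if bal == 0: lengths.append(run); run = 0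
def pvStepLen (acc : List Int × Int × Int) (c : Char) : List Int × Int × Int :=
  let run := acc.2.2 + 1
  let bal := if c = '(' then acc.2.1 + 1 else if c = ')' then acc.2.1 - 1 else acc.2.1
  if bal = 0 then (acc.1 ++ [run], 0, 0) else (acc.1, bal, run)

-- stage-2 loop body: out.append(s[pos:pos+n]); pos += n
def pvStepCut (s : List Char) (acc : List (List Char) × Int) (n : Int) : List (List Char) × Int :=
  (acc.1 ++ [PySem.List.slice s (some acc.2) (some (acc.2 + n))], acc.2 + n)

def strip_white_space_and_group_alt (string : String) : List String :=
  let s := PySem.Chars.replace string.toList [' '] []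
  let lens := (s.foldl pvStepLen ([], 0, 0)).1
  ((lens.foldl (pvStepCut s) ([], 0)).1).map String.ofList

-- ===== PRECONDITION & SPEC =====
def Spec_strip_white_space_and_group (string : String) (out : List String) : Prop := out = strip_white_space_and_group_alt string
instance (string : String) (out : List String) : Decidable (Spec_strip_white_space_and_group string out) := by unfold Spec_strip_white_space_and_group; infer_instance

-- ===== CLAIM (what is proved, stated in full; the proofs are below) =====
def Claim_equal_strip_white_space_and_group : Prop := ∀ (string : String), Dom_strip_white_space_and_group string → Spec_strip_white_space_and_group string (strip_white_space_and_group string)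

-- ===== LEMMAS AND PROOFS =====

-- common recursive characterization: group with current chunk s2 of balance b
def pvGroupRec : List Char → Int → List Char → List (List Char)
  | _, _, [] => []
  | s2, b, c :: t =>
    let b' := if c = '(' then b + 1 else if c = ')' then b - 1 else b
    if b' = 0 then (s2 ++ [c]) :: pvGroupRec [] 0 t else pvGroupRec (s2 ++ [c]) b' t

def pvLenRec : Int → Int → List Char → List Int
  | _, _, [] => []
  | b, r, c :: t =>
    let b' := if c = '(' then b + 1 else if c = ')' then b - 1 else b
    if b' = 0 then (r + 1) :: pvLenRec 0 0 t else pvLenRec b' (r + 1) t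

def pvConsumeRec (s : List Char) : List Int → Int → List (List Char)
  | [], _ => []
  | n :: ns, pos =>
    PySem.List.slice s (some pos) (some (pos + n)) :: pvConsumeRec s ns (pos + n)

-- PySem.Chars.count with a single-character needle is List.count
theorem pv_count_go_single (c : Char) (s : List Char) (fuel acc : Nat) (h : s.length ≤ fuel) :
    PySem.Chars.count.go [c] fuel s acc = acc + s.count c := by
  induction s generalizing fuel acc with
  | nil => cases fuel <;> simp [PySem.Chars.count.go]
  | cons x t ih =>
    cases fuel with
    | zero => simp at h
    | succ f =>
      simp only [PySem.Chars.count.go, List.isPrefixOf, List.count_cons]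
      by_cases hc : c == x
      · simp only [hc]
        simp [ih f (acc + 1) (by simpa using h), show x = c from (beq_iff_eq.mp hc).symm]
        omega
      · simp only [hc]
        simp [ih f acc (by simpa using h)]
        exact fun e => hc (by simp [e])

theorem pv_count_single (s : List Char) (c : Char) : PySem.Chars.count s [c] = s.count c := by
  simp [PySem.Chars.count, pv_count_go_single c s s.length 0 le_rfl]

-- balance bookkeeping: the stepped balance is the paren balance of the extended chunk
theorem pv_bal_step (s2 : List Char) (c : Char) :
    (if c = '(' then ((s2.count '(' : Int) - s2.count ')') + 1
     else if c = ')' then ((s2.count '(' : Int) - s2.count ')') - 1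
     else (s2.count '(' : Int) - s2.count ')')
    = ((s2 ++ [c]).count '(' : Int) - (s2 ++ [c]).count ')' := by
  by_cases h1 : c = '(' <;> by_cases h2 : c = ')' <;>
    simp_all [List.count_append] <;> ring

-- A's fold emits exactly pvGroupRec
theorem pv_foldA_eq (t : List Char) (ls : List (List Char)) (s2 : List Char) :
    (t.foldl pvStepA (ls, s2)).1 =
    ls ++ pvGroupRec s2 ((s2.count '(' : Int) - s2.count ')') t := by
  induction t generalizing ls s2 with
  | nil => simp [pvGroupRec]
  | cons c rest ih =>
    simp only [List.foldl_cons, pvStepA, pvGroupRec]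
    rw [pv_bal_step]
    by_cases h : ((s2 ++ [c]).count '(' : Int) - (s2 ++ [c]).count ')' = 0
    · have hA : PySem.Chars.count (s2 ++ [c]) ['('] = PySem.Chars.count (s2 ++ [c]) [')'] := by
        rw [pv_count_single, pv_count_single]; omega
      simp only [h, hA, if_pos]
      simpa using ih (ls ++ [s2 ++ [c]]) []
    · have hA : ¬ PySem.Chars.count (s2 ++ [c]) ['('] = PySem.Chars.count (s2 ++ [c]) [')'] := by
        rw [pv_count_single, pv_count_single]; omega
      simp only [h, hA, if_false]
      exact ih ls (s2 ++ [c])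

-- B stage 1 fold emits exactly pvLenRec
theorem pv_foldLen_eq (t : List Char) (lens : List Int) (b r : Int) :
    (t.foldl pvStepLen (lens, b, r)).1 = lens ++ pvLenRec b r t := by
  induction t generalizing lens b r with
  | nil => simp [pvLenRec]
  | cons c rest ih =>
    simp only [List.foldl_cons, pvStepLen, pvLenRec]
    by_cases h : (if c = '(' then b + 1 else if c = ')' then b - 1 else b) = 0
    · simp only [h, if_pos]
      simpa using ih (lens ++ [r + 1]) 0 0
    · simp only [h, if_false]
      exact ih lens _ (r + 1)

-- B stage 2 fold emits exactly pvConsumeRec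
theorem pv_foldCut_eq (s : List Char) (ns : List Int) (out : List (List Char)) (pos : Int) :
    (ns.foldl (pvStepCut s) (out, pos)).1 = out ++ pvConsumeRec s ns pos := by
  induction ns generalizing out pos with
  | nil => simp [pvConsumeRec]
  | cons n t ih =>
    simp only [List.foldl_cons, pvStepCut, pvConsumeRec]
    simpa using ih (out ++ [PySem.List.slice s (some pos) (some (pos + n))]) _

-- the length profile reconstructs the chunks by position slicing
theorem pv_consume_len (t : List Char) (u s2 : List Char) (b : Int) :
    pvConsumeRec (u ++ s2 ++ t) (pvLenRec b (s2.length : Int) t) (u.length : Int) = pvGroupRec s2 b t := by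
  induction t generalizing u s2 b with
  | nil => simp [pvLenRec, pvConsumeRec, pvGroupRec]
  | cons c rest ih =>
    simp only [pvLenRec, pvGroupRec]
    by_cases h : (if c = '(' then b + 1 else if c = ')' then b - 1 else b) = 0
    · simp only [h, if_pos]
      unfold pvConsumeRec
      have hcast : (u.length : Int) + ((s2.length : Int) + 1)
          = (u.length : Int) + ((s2.length + 1 : Nat) : Int) := by push_cast; ring
      rw [hcast, PySem.List.slice_natCast_add]
      have hdropu : ((u ++ s2 ++ c :: rest).drop u.length) = s2 ++ c :: rest := by
        rw [List.append_assoc, List.drop_left]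
      have htake : (s2 ++ c :: rest).take (s2.length + 1) = s2 ++ [c] := by
        rw [List.take_append]; simp
      rw [hdropu, htake]
      have h2 := ih (u ++ s2 ++ [c]) ([] : List Char) 0
      have hs : u ++ s2 ++ [c] ++ rest = u ++ s2 ++ c :: rest := by simp
      have hp : ((u.length : Int) + ((s2.length + 1 : Nat) : Int))
          = (((u ++ s2 ++ [c]).length : Nat) : Int) := by simp
      rw [hp]
      simp only [List.append_nil, hs] at h2
      exact congrArg _ h2
    · simp only [h, if_false]
      have hcast : ((s2.length : Int) + 1) = (((s2 ++ [c]).length : Nat) : Int) := by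
        simp
      rw [hcast, show u ++ s2 ++ c :: rest = u ++ (s2 ++ [c]) ++ rest by simp]
      exact ih u (s2 ++ [c]) _

-- ===== VERDICT (by name: the statement is the Claim_ definition above) =====
theorem strip_white_space_and_group_spec : Claim_equal_strip_white_space_and_group := by
  intro string _
  unfold Spec_strip_white_space_and_group strip_white_space_and_group strip_white_space_and_group_alt
  rw [pv_foldA_eq]
  dsimp only
  rw [pv_foldLen_eq, pv_foldCut_eq]
  have := pv_consume_len (PySem.Chars.replace string.toList [' '] []) [] [] 0
  simp at this ⊢
  rw [this]
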